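-- pv_equiv track=rewrite | github.com/go2telegram/five_keys_mirror | app/utils/cards.py | _collect_media
-- ===== SOURCE A (Python) =====
-- from typing import Iterable, Sequence
--
-- MAX_MEDIA = 3
--
-- def _collect_media(products: Sequence[dict]) -> list[str]:
--     media: list[str] = []
--     for product in products:
--         for img in product.get("images", []) or []:
--             if img and img not in media:
--                 media.append(img)
--             if len(media) >= MAX_MEDIA:
--                 return media
--     return media
-- ===== SOURCE B (Python) =====
-- from itertools import chain
--
-- MAX_MEDIA = 3
--
-- def _collect_media(products):
--     imgs = chain.from_iterable(p.get("images", []) or [] for p in products)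
--     return list(dict.fromkeys(img for img in imgs if img))[:MAX_MEDIA]
-- ===== Notes on version B (the rewrite author's own statement) =====
-- stated objective: idiomatic
-- what changed: Replaces the nested loop with in-loop membership scan and early return by a flatten (chain.from_iterable) + ordered dedupe (dict.fromkeys) + slice pipeline.
import Mathlib
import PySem

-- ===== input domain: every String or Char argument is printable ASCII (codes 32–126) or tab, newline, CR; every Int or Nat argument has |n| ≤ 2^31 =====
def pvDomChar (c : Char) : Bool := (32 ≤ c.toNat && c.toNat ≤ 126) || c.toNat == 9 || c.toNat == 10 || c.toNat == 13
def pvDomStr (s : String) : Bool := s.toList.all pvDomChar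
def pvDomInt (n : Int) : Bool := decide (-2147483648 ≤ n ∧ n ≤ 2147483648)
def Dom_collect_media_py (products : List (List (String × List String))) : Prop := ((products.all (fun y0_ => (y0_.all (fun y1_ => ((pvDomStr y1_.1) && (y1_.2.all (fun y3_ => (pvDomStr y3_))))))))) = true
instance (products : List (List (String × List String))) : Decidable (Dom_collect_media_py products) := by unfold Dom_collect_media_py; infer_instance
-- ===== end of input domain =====

-- B replaces A's nested loop with early return by a flatten + ordered-dedupe + slice pipeline (idiomatic; same cost).

-- ===== PORT A =====
-- inner 'for img in …' loop; .inl = early 'return media', .inr = fall through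
def pvInnerA : List String → List String → Sum (List String) (List String)
  | [], media => .inr media
  | img :: imgs, media =>
      let m := if img ≠ "" ∧ img ∉ media then media ++ [img] else media
      if 3 ≤ m.length then .inl m else pvInnerA imgs m

-- outer 'for product in products' loop
def pvOuterA : List (List (String × List String)) → List String → List String
  | [], media => media
  | p :: rest, media =>
      match pvInnerA (PySem.Dict.getD (PySem.Dict.mk p) "images" []) media with
      | .inl m => m
      | .inr m => pvOuterA rest m

def collect_media_py (products : List (List (String × List String))) : List String :=
  pvOuterA products []

-- ===== PORT B =====
def collect_media_py_alt (products : List (List (String × List String))) : List String :=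
  (PySem.List.dedup
    ((products.flatMap (fun p => PySem.Dict.getD (PySem.Dict.mk p) "images" [])).filter (fun img => img ≠ ""))).take 3

-- ===== PRECONDITION & SPEC =====
def Spec_collect_media_py (products : List (List (String × List String))) (out : List String) : Prop := out = collect_media_py_alt products
instance (products : List (List (String × List String))) (out : List String) : Decidable (Spec_collect_media_py products out) := by unfold Spec_collect_media_py; infer_instance

-- ===== CLAIM (what is proved, stated in full; the proofs are below) =====
def Claim_equal_collect_media_py : Prop := ∀ (products : List (List (String × List String))), Dom_collect_media_py products → Spec_collect_media_py products (collect_media_py products)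

-- ===== LEMMAS AND PROOFS =====

-- pure one-pass dedupe-of-truthy fold (no early return), the common denominator of both ports
def pvDD (media : List String) : List String → List String
  | [] => media
  | img :: imgs => pvDD (if img ≠ "" ∧ img ∉ media then media ++ [img] else media) imgs

theorem pvDD_prefix (xs : List String) (media : List String) :
    ∃ t, pvDD media xs = media ++ t := by
  induction xs generalizing media with
  | nil => exact ⟨[], by simp [pvDD]⟩
  | cons img imgs ih =>
      simp only [pvDD]
      split
      · obtain ⟨t, ht⟩ := ih (media ++ [img])
        exact ⟨[img] ++ t, by simp [ht]⟩
      · exact ih media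

theorem pvInnerA_eq (xs : List String) (media : List String) (h : media.length < 3) :
    pvInnerA xs media =
      if 3 ≤ (pvDD media xs).length then .inl ((pvDD media xs).take 3)
      else .inr (pvDD media xs) := by
  induction xs generalizing media with
  | nil => simp [pvInnerA, pvDD, Nat.not_le.mpr h]
  | cons img imgs ih =>
      simp only [pvInnerA, pvDD]
      set m := if img ≠ "" ∧ img ∉ media then media ++ [img] else media with hm
      have hmlen : m.length ≤ 3 := by
        rw [hm]; split
        · simp; omega
        · omega
      by_cases h3 : 3 ≤ m.length
      · have hm3 : m.length = 3 := le_antisymm hmlen h3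
        obtain ⟨t, ht⟩ := pvDD_prefix imgs m
        rw [if_pos h3, ht]
        have hlen : 3 ≤ (m ++ t).length := by simp [hm3]
        rw [if_pos hlen, List.take_append_of_le_length (by omega)]
        simp [List.take_of_length_le (le_of_eq hm3)]
      · rw [if_neg h3]
        exact ih m (by omega)

theorem pvOuterA_eq (products : List (List (String × List String))) (media : List String)
    (h : media.length < 3) :
    pvOuterA products media =
      (pvDD media (products.flatMap (fun p => PySem.Dict.getD (PySem.Dict.mk p) "images" []))).take 3 := by
  induction products generalizing media with
  | nil => simp [pvOuterA, pvDD, List.take_of_length_le (by omega : media.length ≤ 3)]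
  | cons p rest ih =>
      have dd_append : ∀ (a b : List String) (m : List String),
          pvDD m (a ++ b) = pvDD (pvDD m a) b := by
        intro a
        induction a with
        | nil => intro b m; rfl
        | cons x xs ihx => intro b m; simp only [List.cons_append, pvDD]; exact ihx b _
      simp only [pvOuterA, List.flatMap_cons, dd_append]
      rw [pvInnerA_eq _ _ h]
      set l := pvDD media (PySem.Dict.getD (PySem.Dict.mk p) "images" []) with hl
      by_cases h3 : 3 ≤ l.length
      · rw [if_pos h3]
        obtain ⟨t, ht⟩ := pvDD_prefix (rest.flatMap (fun p => PySem.Dict.getD (PySem.Dict.mk p) "images" [])) l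
        rw [ht, List.take_append_of_le_length h3]
      · rw [if_neg h3]
        exact ih l (by omega)

-- pvDD is Set.update with the truthiness filter pulled out
theorem pvDD_eq_update (xs : List String) (media : List String) :
    pvDD media xs = PySem.Set.update media (xs.filter (fun img => img ≠ "")) := by
  induction xs generalizing media with
  | nil => rfl
  | cons img imgs ih =>
      simp only [pvDD, List.filter_cons]
      by_cases he : img = ""
      · simp [he, ih]
      · have : (decide ¬img = "") = true := by simp [he]
        rw [this, if_pos rfl]
        simp only [PySem.Set.update, List.foldl_cons]
        rw [← PySem.Set.update, ← ih]
        congr 1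
        by_cases hmem : img ∈ media
        · simp [hmem, PySem.Set.add]
        · simp [he, hmem, PySem.Set.add]

-- ===== VERDICT (by name: the statement is the Claim_ definition above) =====
theorem collect_media_py_spec : Claim_equal_collect_media_py := by
  intro products _
  unfold Spec_collect_media_py collect_media_py collect_media_py_alt
  rw [pvOuterA_eq _ _ (by simp), pvDD_eq_update]
  simp [PySem.List.dedup_eq_ofList, PySem.Set.ofList_eq_foldl, PySem.Set.update]
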